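-- pv_equiv track=rewrite | github.com/nicastelo/nah | src/nah/context.py | _extract_positional_host
-- ===== SOURCE A (Python) =====
-- def _looks_like_local_path(arg: str) -> bool:
--     """Check if an argument looks like a local file path rather than a hostname."""
--     return arg.startswith(("/", "./", "../", "~"))
--
-- def _strip_host_from_colon_suffix(s: str) -> str:
--     """Extract hostname from host:port or host:path, handling [IPv6] brackets."""
--     if s.startswith("["):
--         end = s.find("]")
--         if end != -1:
--             return s[1:end]
--     return s.split(":")[0]
--
-- def _collect_positionals(args: list[str], valued_flags: set[str]) -> list[str]:
--     """Collect positional (non-flag) args, skipping valued flags and their values."""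
--     positionals = []
--     skip_next = False
--     for arg in args:
--         if skip_next:
--             skip_next = False
--             continue
--         if arg.startswith("-"):
--             if arg in valued_flags:
--                 skip_next = True
--             continue
--         positionals.append(arg)
--     return positionals
--
-- def _extract_positional_host(args: list[str], valued_flags: set[str]) -> str | None:
--     """Extract host from positional args, skipping valued flags. Handles user@host."""
--     positionals = _collect_positionals(args, valued_flags)
--     for arg in positionals:
--         if "@" in arg:
--             host_part = arg.split("@", 1)[1]
--             return _strip_host_from_colon_suffix(host_part) if ":" in host_part else host_part
--     # First positional that doesn't look like a local path
--     for arg in positionals: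
--         if not _looks_like_local_path(arg):
--             return arg
--     # Last resort: first positional
--     return positionals[0] if positionals else None
-- ===== SOURCE B (Python) =====
-- def _looks_like_local_path(arg: str) -> bool:
--     return arg.startswith(("/", "./", "../", "~"))
--
-- def _strip_host_from_colon_suffix(s: str) -> str:
--     if s.startswith("["):
--         end = s.find("]")
--         if end != -1:
--             return s[1:end]
--     return s.split(":")[0]
--
-- def _extract_positional_host(args, valued_flags):
--     """Single pass: track three candidates and decide at the end."""
--     first_at = None
--     first_non_local = None
--     first_positional = None
--     skip_next = False
--     for arg in args:
--         if skip_next: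
--             skip_next = False
--             continue
--         if arg.startswith("-"):
--             skip_next = arg in valued_flags
--             continue
--         if first_positional is None:
--             first_positional = arg
--         if first_at is None and "@" in arg:
--             host_part = arg.split("@", 1)[1]
--             first_at = _strip_host_from_colon_suffix(host_part) if ":" in host_part else host_part
--         if first_non_local is None and not _looks_like_local_path(arg):
--             first_non_local = arg
--     if first_at is not None:
--         return first_at
--     if first_non_local is not None:
--         return first_non_local
--     return first_positional
-- ===== Notes on version B (the rewrite author's own statement) =====
-- stated objective: alternative
-- what changed: A collects positionals into a list and then runs up to three separate scans over it (@-host, first non-local, first positional); B makes one pass over args, maintaining skip_next and three first-hit candidate variables, and picks among them only after the loop.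
import Mathlib
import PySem

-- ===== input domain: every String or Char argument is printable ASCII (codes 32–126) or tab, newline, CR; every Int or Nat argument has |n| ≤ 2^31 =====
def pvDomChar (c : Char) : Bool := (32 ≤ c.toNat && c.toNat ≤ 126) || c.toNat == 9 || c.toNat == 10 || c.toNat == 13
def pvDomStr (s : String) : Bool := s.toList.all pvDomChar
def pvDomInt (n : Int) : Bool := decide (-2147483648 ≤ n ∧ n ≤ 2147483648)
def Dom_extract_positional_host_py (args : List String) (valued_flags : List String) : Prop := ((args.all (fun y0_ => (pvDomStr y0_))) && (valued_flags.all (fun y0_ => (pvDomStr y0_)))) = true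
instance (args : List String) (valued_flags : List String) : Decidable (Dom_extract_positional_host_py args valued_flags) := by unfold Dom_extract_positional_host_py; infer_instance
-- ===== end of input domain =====

-- B replaces A's collect-then-three-scans by a single pass over args with three
-- first-hit candidate variables decided after the loop (objective: alternative).

-- ===== PORT A =====
-- helpers shared by both Pythons (same module)

-- _looks_like_local_path
def pvLooksLocal (arg : String) : Bool :=
  PySem.Str.startswith arg "/" || PySem.Str.startswith arg "./" ||
  PySem.Str.startswith arg "../" || PySem.Str.startswith arg "~"

-- _strip_host_from_colon_suffix
def pvStripHost (s : String) : String :=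
  if PySem.Str.startswith s "[" then
    let e := PySem.Str.find s "]"
    if e ≠ -1 then PySem.Str.slice s (some 1) (some e)
    else ((PySem.Str.split? s ":").getD []).headD ""
  else ((PySem.Str.split? s ":").getD []).headD ""

-- arg.split("@", 1)[1] (guarded by '"@" in arg', so the defaults are never hit)
def pvHostAfterAt (arg : String) : String :=
  ((PySem.Str.splitMax? arg "@" 1).getD []).getD 1 ""

-- the value A's first loop returns for an arg containing "@"
def pvAtValue (arg : String) : String :=
  let host_part := pvHostAfterAt arg
  if PySem.Str.isIn ":" host_part then pvStripHost host_part else host_part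

-- _collect_positionals' loop (skip_next, append-to-list accumulator)
def pvCollectLoop (vf : List String) : List String → Bool → List String → List String
  | [], _, acc => acc
  | arg :: rest, skip, acc =>
    if skip then pvCollectLoop vf rest false acc
    else if PySem.Str.startswith arg "-" then
      pvCollectLoop vf rest (vf.contains arg) acc
    else pvCollectLoop vf rest false (acc ++ [arg])

-- A's first loop: return on the first arg containing "@"
def pvLoopAt : List String → Option String
  | [] => none
  | arg :: rest => if PySem.Str.isIn "@" arg then some (pvAtValue arg) else pvLoopAt rest

-- A's second loop: first positional that doesn't look like a local path
def pvLoopNonLocal : List String → Option String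
  | [] => none
  | arg :: rest => if pvLooksLocal arg then pvLoopNonLocal rest else some arg

def extract_positional_host_py (args : List String) (valued_flags : List String) : Option String :=
  let positionals := pvCollectLoop valued_flags args false []
  match pvLoopAt positionals with
  | some h => some h
  | none =>
    match pvLoopNonLocal positionals with
    | some h => some h
    | none => positionals.head?   -- positionals[0] if positionals else None

-- ===== PORT B =====
-- B's single loop: skip flag plus the three first-hit candidates
def pvAltLoop (vf : List String) : List String → Bool → Option String → Option String → Option String → Option String
  | [], _, fat, fnl, fpos =>
    match fat with
    | some h => some h
    | none => match fnl with
      | some h => some h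
      | none => fpos
  | arg :: rest, skip, fat, fnl, fpos =>
    if skip then pvAltLoop vf rest false fat fnl fpos
    else if PySem.Str.startswith arg "-" then
      pvAltLoop vf rest (vf.contains arg) fat fnl fpos
    else
      let fpos := if fpos.isNone then some arg else fpos
      let fat := if fat.isNone && PySem.Str.isIn "@" arg then some (pvAtValue arg) else fat
      let fnl := if fnl.isNone && !pvLooksLocal arg then some arg else fnl
      pvAltLoop vf rest false fat fnl fpos

def extract_positional_host_py_alt (args : List String) (valued_flags : List String) : Option String :=
  pvAltLoop valued_flags args false none none none

-- ===== PRECONDITION & SPEC =====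
def Spec_extract_positional_host_py (args : List String) (valued_flags : List String) (out : Option String) : Prop := out = extract_positional_host_py_alt args valued_flags
instance (args : List String) (valued_flags : List String) (out : Option String) : Decidable (Spec_extract_positional_host_py args valued_flags out) := by unfold Spec_extract_positional_host_py; infer_instance

-- ===== CLAIM (what is proved, stated in full; the proofs are below) =====
def Claim_equal_extract_positional_host_py : Prop := ∀ (args : List String) (valued_flags : List String), Dom_extract_positional_host_py args valued_flags → Spec_extract_positional_host_py args valued_flags (extract_positional_host_py args valued_flags)

-- ===== LEMMAS AND PROOFS =====

-- the post-loop decision, as a function of the three candidates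
def pvFinish (fat fnl fpos : Option String) : Option String :=
  match fat with
  | some h => some h
  | none => match fnl with
    | some h => some h
    | none => fpos

-- processing a list of positionals with the three candidate updates
def pvG : List String → Option String → Option String → Option String → Option String
  | [], fat, fnl, fpos => pvFinish fat fnl fpos
  | arg :: ps, fat, fnl, fpos =>
    pvG ps (if fat.isNone && PySem.Str.isIn "@" arg then some (pvAtValue arg) else fat)
           (if fnl.isNone && !pvLooksLocal arg then some arg else fnl)
           (if fpos.isNone then some arg else fpos)

def pvOr (x y : Option String) : Option String :=
  match x with
  | some v => some v
  | none => y

lemma pvG_eq (ps : List String) : ∀ fat fnl fpos,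
    pvG ps fat fnl fpos =
      pvOr (pvOr fat (pvLoopAt ps)) (pvOr (pvOr fnl (pvLoopNonLocal ps)) (pvOr fpos ps.head?)) := by
  induction ps with
  | nil =>
    intro fat fnl fpos
    cases fat <;> cases fnl <;> cases fpos <;> rfl
  | cons arg ps ih =>
    intro fat fnl fpos
    simp only [pvG, ih]
    have h1 : pvOr (if fat.isNone && PySem.Str.isIn "@" arg then some (pvAtValue arg) else fat)
        (pvLoopAt ps) = pvOr fat (pvLoopAt (arg :: ps)) := by
      cases fat <;> simp only [pvLoopAt, Option.isNone, Bool.true_and, Bool.false_and, pvOr] <;>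
        cases h : PySem.Str.isIn "@" arg <;> simp
    have h2 : pvOr (if fnl.isNone && !pvLooksLocal arg then some arg else fnl)
        (pvLoopNonLocal ps) = pvOr fnl (pvLoopNonLocal (arg :: ps)) := by
      cases fnl <;> simp only [pvLoopNonLocal, Option.isNone, Bool.true_and, Bool.false_and, pvOr] <;>
        cases h : pvLooksLocal arg <;> simp
    have h3 : pvOr (if fpos.isNone then some arg else fpos) ps.head?
        = pvOr fpos (arg :: ps).head? := by
      cases fpos <;> simp [pvOr]
    rw [h1, h2, h3]

lemma pvCollectLoop_acc (vf : List String) (args : List String) : ∀ skip acc,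
    pvCollectLoop vf args skip acc = acc ++ pvCollectLoop vf args skip [] := by
  induction args with
  | nil => intro skip acc; simp [pvCollectLoop]
  | cons arg rest ih =>
    intro skip acc
    cases skip with
    | true => simp only [pvCollectLoop, if_true]; exact ih false acc
    | false =>
      by_cases hd : PySem.Str.startswith arg "-"
      · simp only [pvCollectLoop, hd, Bool.false_eq_true, if_false, if_true]
        exact ih _ acc
      · simp only [pvCollectLoop, eq_false hd, Bool.false_eq_true, if_false]
        rw [ih false (acc ++ [arg]), ih false ([] ++ [arg])]
        simp

lemma pvAltLoop_eq (vf : List String) (args : List String) : ∀ skip fat fnl fpos,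
    pvAltLoop vf args skip fat fnl fpos = pvG (pvCollectLoop vf args skip []) fat fnl fpos := by
  induction args with
  | nil => intro skip fat fnl fpos; rfl
  | cons arg rest ih =>
    intro skip fat fnl fpos
    cases skip with
    | true =>
      simp only [pvAltLoop, pvCollectLoop, if_true]
      exact ih false fat fnl fpos
    | false =>
      by_cases hd : PySem.Str.startswith arg "-"
      · simp only [pvAltLoop, pvCollectLoop, hd, Bool.false_eq_true, if_false, if_true]
        exact ih _ fat fnl fpos
      · simp only [pvAltLoop, pvCollectLoop, eq_false hd, Bool.false_eq_true, if_false,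
          List.nil_append]
        rw [ih, pvCollectLoop_acc vf rest false [arg]]
        rfl

-- ===== VERDICT (by name: the statement is the Claim_ definition above) =====
theorem extract_positional_host_py_spec : Claim_equal_extract_positional_host_py := by
  intro args vf _
  unfold Spec_extract_positional_host_py
  simp only [extract_positional_host_py, extract_positional_host_py_alt]
  rw [pvAltLoop_eq, pvG_eq]
  cases hAt : pvLoopAt (pvCollectLoop vf args false []) <;>
    cases hNl : pvLoopNonLocal (pvCollectLoop vf args false []) <;>
      simp only [pvOr]
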